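-- pv_equiv track=rewrite | github.com/Denomaro/Task1 | lecture_1_4.py | solve
-- ===== SOURCE A (Python) =====
-- def solve(s, word):
--     ret = []
--
--     if word == '':
--         ret.append(''.rjust(len(s), '-'))
--         return ret
--
--     left_s = ''
--     for si in range(len(s)):
--         if word[0] == s[si]:
--             left_s = ''.rjust(si, '-') + s[si]
--             if s[si+1:] == '' and word[1:] == '':
--                 ret.append(left_s)
--             else:
--                 right_s_list = solve(s[si+1:], word[1:])
--                 for right_s in right_s_list:
--                     ret.append(left_s + right_s)
--     return ret
-- ===== SOURCE B (Python) =====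
-- def solve(s, word):
--     # Bottom-up DP over suffixes: nxt[j] = patterns of the current suffix of s
--     # matching word[j:], built scanning s right-to-left (no recursion).
--     m = len(word)
--     nxt = [([''] if j == m else []) for j in range(m + 1)]
--     for c in reversed(s):
--         cur = []
--         for j in range(m + 1):
--             row = [c + r for r in nxt[j + 1]] if j < m and c == word[j] else []
--             row += ['-' + r for r in nxt[j]]
--             cur.append(row)
--         nxt = cur
--     return nxt[0]
-- ===== Notes on version B (the rewrite author's own statement) =====
-- stated objective: alternative
-- what changed: Replaced A's top-down scan recursion on (suffix of s, suffix of word) with an iterative bottom-up DP table indexed by word position, filled in one right-to-left pass over s.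
import Mathlib
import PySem

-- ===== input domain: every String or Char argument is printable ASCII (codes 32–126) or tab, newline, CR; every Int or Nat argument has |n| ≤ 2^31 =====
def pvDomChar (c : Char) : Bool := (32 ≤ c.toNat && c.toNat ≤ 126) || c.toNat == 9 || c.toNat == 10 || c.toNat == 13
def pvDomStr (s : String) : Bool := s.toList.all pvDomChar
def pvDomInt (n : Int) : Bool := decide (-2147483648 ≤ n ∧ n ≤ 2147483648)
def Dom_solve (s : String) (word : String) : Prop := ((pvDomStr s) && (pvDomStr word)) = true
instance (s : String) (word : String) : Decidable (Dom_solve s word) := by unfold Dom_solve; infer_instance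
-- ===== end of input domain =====

-- B replaces A's top-down scan recursion (which re-solves the same (suffix, word-index)
-- subproblems repeatedly) with an iterative bottom-up DP table indexed by word position,
-- built in one right-to-left pass over s; the returned list is identical.

-- ===== PORT A =====
-- A, over lists of chars (the String wrapper converts at the boundary).  `solveLoop s w si`
-- is A's `for si in range(len(s))` loop, walking the suffix of s that starts at index si
-- (head c = s[si], tail t = s[si+1:]); branches in A's order; ''.rjust(si,'-') = replicate si '-'.
mutual
def solveCore (s word : List Char) : List (List Char) :=
  if word = [] then [List.replicate s.length '-']
  else solveLoop s word 0
termination_by (s.length, 1)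

def solveLoop : List Char → List Char → Nat → List (List Char)
  | [], _, _ => []
  | c :: t, w, si =>
      (if w.head? = some c then
         (if t = [] ∧ w.drop 1 = [] then [List.replicate si '-' ++ [c]]
          else (solveCore t (w.drop 1)).map (fun r => List.replicate si '-' ++ [c] ++ r))
       else []) ++ solveLoop t w (si + 1)
termination_by s w si => (s.length, 0)
end

def solve (s : String) (word : String) : List String :=
  (solveCore s.toList word.toList).map String.mk

-- ===== PORT B =====
-- B's inner `for j in range(m+1)` loop body: row j of the new table from the old table nxt;
-- Python's guard (j < m and c == word[j]) is expressed as w[j]? = some c.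
def altStep (w : List Char) (m : Nat) (c : Char) (nxt : List (List (List Char))) : List (List (List Char)) :=
  (List.range (m + 1)).map (fun j =>
    (if w[j]? = some c then (nxt.getD (j + 1) []).map (fun r => c :: r) else [])
      ++ (nxt.getD j []).map (fun r => '-' :: r))

-- B over lists of chars: foldr over s = the `for c in reversed(s)` loop.
def solveAltCore (s w : List Char) : List (List Char) :=
  let m := w.length
  let init := (List.range (m + 1)).map (fun j => if j = m then [([] : List Char)] else [])
  (s.foldr (fun c nxt => altStep w m c nxt) init).getD 0 []

def solve_alt (s : String) (word : String) : List String :=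
  (solveAltCore s.toList word.toList).map String.mk

-- ===== PRECONDITION & SPEC =====
def Spec_solve (s : String) (word : String) (out : List String) : Prop := out = solve_alt s word
instance (s : String) (word : String) (out : List String) : Decidable (Spec_solve s word out) := by unfold Spec_solve; infer_instance

-- ===== CLAIM (what is proved, stated in full; the proofs are below) =====
def Claim_equal_solve : Prop := ∀ (s : String) (word : String), Dom_solve s word → Spec_solve s word (solve s word)

-- ===== LEMMAS AND PROOFS =====

-- the common mathematical recurrence both programs compute
def dpD : List Char → List Char → List (List Char)
  | s, [] => [List.replicate s.length '-']
  | [], _ :: _ => []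
  | c :: t, w0 :: wt =>
      (if w0 = c then (dpD t wt).map (fun r => c :: r) else [])
        ++ (dpD t (w0 :: wt)).map (fun r => '-' :: r)

lemma repApp (si : Nat) (c : Char) (r : List Char) :
    List.replicate si '-' ++ [c] ++ r = List.replicate si '-' ++ (c :: r) := by simp

lemma repSucc (si : Nat) (r : List Char) :
    List.replicate (si + 1) '-' ++ r = List.replicate si '-' ++ ('-' :: r) := by
  rw [List.replicate_succ']; simp

lemma getD_map_range {α : Type} (f : Nat → α) (n j : Nat) (d : α) (h : j < n) :
    ((List.range n).map f).getD j d = f j := by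
  simp [List.getD, h]

lemma solveLoop_eq (s : List Char) (w0 : Char) (wt : List Char)
    (hIH : ∀ t w', t.length < s.length → solveCore t w' = dpD t w') :
    ∀ si, solveLoop s (w0 :: wt) si
      = (dpD s (w0 :: wt)).map (fun r => List.replicate si '-' ++ r) := by
  induction s with
  | nil => intro si; rw [solveLoop]; simp [dpD]
  | cons c t ih =>
    intro si
    have ht : ∀ t' w', t'.length < t.length → solveCore t' w' = dpD t' w' := by
      intro t' w' h; exact hIH t' w' (by simp; omega)
    rw [solveLoop, ih ht (si + 1)]
    simp only [List.head?_cons, List.drop_succ_cons, List.drop_zero, dpD]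
    by_cases hw : w0 = c
    · rw [if_pos (by rw [hw]), if_pos hw]
      by_cases hend : t = [] ∧ wt = []
      · obtain ⟨h1, h2⟩ := hend
        subst h1; subst h2; subst hw
        rw [if_pos ⟨rfl, rfl⟩]
        simp [dpD]
      · rw [if_neg hend, hIH t wt (by simp)]
        subst hw
        simp only [List.map_append, List.map_map, Function.comp_def, repApp, repSucc]
    · rw [if_neg (by simpa using hw), if_neg hw]
      simp only [List.nil_append, List.map_map, Function.comp_def, repSucc]

lemma solveCore_eq_dpD : ∀ (n : Nat) (s w : List Char), s.length ≤ n → solveCore s w = dpD s w := by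
  intro n
  induction n with
  | zero =>
    intro s w hs
    have hnil : s = [] := by cases s <;> simp_all
    subst hnil
    cases w with
    | nil => rw [solveCore]; simp [dpD]
    | cons w0 wt => rw [solveCore]; simp only [reduceCtorEq, if_false]; rw [solveLoop]; simp [dpD]
  | succ n ih =>
    intro s w hs
    cases w with
    | nil => rw [solveCore]; simp [dpD]
    | cons w0 wt =>
      rw [solveCore]
      simp only [reduceCtorEq, if_false]
      rw [solveLoop_eq s w0 wt (fun t w' htl => ih t w' (by omega)) 0]
      simp

-- B side: row j of the folded table is dpD of the suffix word.drop j
lemma altTable_getD (w : List Char) :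
    ∀ (s : List Char) (j : Nat), j ≤ w.length →
      ((s.foldr (fun c nxt => altStep w w.length c nxt)
          ((List.range (w.length + 1)).map (fun j => if j = w.length then [([] : List Char)] else []))).getD j [])
        = dpD s (w.drop j) := by
  intro s
  induction s with
  | nil =>
    intro j hj
    rw [List.foldr_nil, getD_map_range _ _ _ _ (by omega)]
    by_cases h : j = w.length
    · subst h; simp [dpD, List.drop_length]
    · have hd : w.drop j ≠ [] := by simp [List.drop_eq_nil_iff]; omega
      rw [if_neg h]
      cases hdd : w.drop j with
      | nil => exact absurd hdd hd
      | cons a b => simp [dpD]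
  | cons c t ih =>
    intro j hj
    rw [List.foldr_cons, altStep, getD_map_range _ _ _ _ (by omega)]
    by_cases h : j = w.length
    · subst h
      have hnone : w[w.length]? = none := by simp
      rw [hnone, if_neg (by simp), ih w.length le_rfl, List.drop_length]
      simp [dpD, List.replicate_succ]
    · have hlt : j < w.length := by omega
      have hsome : w[j]? = some w[j] := List.getElem?_eq_getElem hlt
      have hdrop : w.drop j = w[j] :: w.drop (j + 1) := List.drop_eq_getElem_cons hlt
      rw [hsome, ih j (by omega), ih (j + 1) (by omega), hdrop]
      simp only [dpD, Option.some.injEq]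

lemma core_eq (s w : List Char) : solveCore s w = solveAltCore s w := by
  rw [solveCore_eq_dpD s.length s w le_rfl]
  unfold solveAltCore
  rw [altTable_getD w s 0 (by omega), List.drop_zero]

-- ===== VERDICT (by name: the statement is the Claim_ definition above) =====
theorem solve_spec : Claim_equal_solve := by
  intro s word _
  unfold Spec_solve solve solve_alt
  rw [core_eq]
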